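-- pv_equiv track=rewrite | github.com/linovallejo/LFP_PY2_9017323 | principal.py | estado1Valido
-- ===== SOURCE A (Python) =====
-- def estado1Valido(lexema):
--     valido = False
--     for i in range(0, len(lexema), 1):
--         if (lexema[i].isupper()):
--             valido = True
--         else:
--             valido = False
--     return valido
-- ===== SOURCE B (Python) =====
-- def estado1Valido(lexema):
--     # Closed form: the loop's final value depends only on the last character.
--     return bool(lexema) and lexema[-1].isupper()
-- ===== Notes on version B (the rewrite author's own statement) =====
-- stated objective: simpler
-- what changed: Replaced the accumulating loop (whose result each iteration overwrites) with a closed-form test of only the last character, guarded by non-emptiness.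
import Mathlib
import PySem

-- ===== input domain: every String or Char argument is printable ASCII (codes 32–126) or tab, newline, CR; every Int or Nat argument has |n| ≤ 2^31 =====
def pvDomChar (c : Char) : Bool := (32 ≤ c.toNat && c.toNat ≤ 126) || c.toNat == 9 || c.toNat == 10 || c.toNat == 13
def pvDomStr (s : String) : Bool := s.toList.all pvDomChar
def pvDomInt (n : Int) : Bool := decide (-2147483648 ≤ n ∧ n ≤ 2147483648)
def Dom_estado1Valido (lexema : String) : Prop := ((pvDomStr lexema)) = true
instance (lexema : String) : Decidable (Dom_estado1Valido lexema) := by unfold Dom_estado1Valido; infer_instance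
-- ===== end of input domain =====

-- ===== PORT A =====
-- A: loop over every index, overwriting 'valido' with the isupper test of each char.
def estado1Valido (lexema : String) : Bool :=
  lexema.toList.foldl (fun _ c => if PySem.Chars.isupper c then true else false) false

-- ===== PORT B =====
-- B: closed form — nonempty and the last character is uppercase.
def estado1Valido_alt (lexema : String) : Bool :=
  match lexema.toList.getLast? with
  | none => false
  | some c => PySem.Chars.isupper c

-- ===== PRECONDITION & SPEC =====
def Spec_estado1Valido (lexema : String) (out : Bool) : Prop := out = estado1Valido_alt lexema
instance (lexema : String) (out : Bool) : Decidable (Spec_estado1Valido lexema out) := by unfold Spec_estado1Valido; infer_instance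

-- ===== CLAIM (what is proved, stated in full; the proofs are below) =====
def Claim_equal_estado1Valido : Prop := ∀ (lexema : String), Dom_estado1Valido lexema → Spec_estado1Valido lexema (estado1Valido lexema)

-- ===== LEMMAS AND PROOFS =====
-- Header: B replaces the accumulating loop by a closed-form last-character test (simpler).

-- ===== VERDICT (by name: the statement is the Claim_ definition above) =====
theorem foldl_last (l : List Char) (b : Bool) :
    l.foldl (fun _ c => if PySem.Chars.isupper c then true else false) b =
      (match l.getLast? with
       | none => b
       | some c => PySem.Chars.isupper c) := by
  induction l generalizing b with
  | nil => rfl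
  | cons x xs ih =>
    simp only [List.foldl_cons, ih]
    cases xs with
    | nil => cases h : PySem.Chars.isupper x <;> simp [List.getLast?, h]
    | cons y ys =>
      cases h : (y :: ys).getLast? with
      | none => simp [List.getLast?_eq_none_iff] at h
      | some c => simp [List.getLast?_cons_cons, h]

theorem estado1Valido_spec : Claim_equal_estado1Valido := by
  intro lexema _
  unfold Spec_estado1Valido estado1Valido estado1Valido_alt
  rw [foldl_last]
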